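-- pv_equiv track=rewrite | github.com/aniketgiriyalkar/PythonAssesment | assessment.py | reorderStr
-- ===== SOURCE A (Python) =====
-- def createCharCountDict(inputStr):
--     """
--     Function that creates a dictionary to maintain a count of all characters in
--     the input string.
--     :param inputStr: input string
--     :return: Dictionary containing the character count of all the characters in
--              the input string
--     """
--     charDict = {}
--     for char in inputStr:
--         charDict[char.lower()] = charDict.get(char.lower(), 0) + 1
--     return charDict
--
-- def reorderStr(inputStr):
--     """
--     Function that reorders the input string to obtain the solution
--     :param inputStr: input string
--     :return: result string in order of number of occurrences and order from the
--              input string.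
--     """
--     charCountDict = createCharCountDict(inputStr)
--     answer = ""
--     minCount = min(list(charCountDict.items()), key=lambda x: x[1])[1]
--     maxCount = max(list(charCountDict.items()), key=lambda x: x[1])[1]
--     for charCount in range(minCount, maxCount + 1):
--         for char in inputStr:
--             if charCountDict[char.lower()] == charCount:
--                 answer += char
--     return answer
-- ===== SOURCE B (Python) =====
-- def reorderStr(inputStr):
--     """
--     Bucket version: one pass to count (case-insensitively), one pass to bucket
--     characters by their count (keeping input order), then concatenate the
--     buckets in ascending count order.  O(n + k log k) instead of A's
--     O((max-min) * n) nested scan.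
--     """
--     counts = {}
--     for ch in inputStr:
--         k = ch.lower()
--         counts[k] = counts.get(k, 0) + 1
--     buckets = {}
--     for ch in inputStr:
--         buckets.setdefault(counts[ch.lower()], []).append(ch)
--     return "".join("".join(buckets[c]) for c in sorted(buckets))
-- ===== Notes on version B (the rewrite author's own statement) =====
-- stated objective: faster
-- what changed: Instead of scanning the whole string once per candidate count from min to max, B buckets the characters by their (case-insensitive) count in a single pass and concatenates the buckets in sorted count order.
import Mathlib
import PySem

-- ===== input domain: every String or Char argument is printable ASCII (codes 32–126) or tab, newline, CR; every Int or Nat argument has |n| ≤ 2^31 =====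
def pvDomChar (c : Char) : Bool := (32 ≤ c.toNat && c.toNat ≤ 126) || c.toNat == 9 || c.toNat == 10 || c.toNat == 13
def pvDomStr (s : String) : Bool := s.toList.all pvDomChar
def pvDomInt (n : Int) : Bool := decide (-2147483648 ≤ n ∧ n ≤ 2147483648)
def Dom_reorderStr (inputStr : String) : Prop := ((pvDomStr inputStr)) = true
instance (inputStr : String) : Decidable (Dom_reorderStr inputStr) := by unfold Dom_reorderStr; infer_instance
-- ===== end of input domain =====

-- B buckets characters by their case-insensitive count in one pass and concatenates the
-- buckets in sorted count order, instead of A's rescan of the whole string for every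
-- candidate count between min and max.


-- ===== PORT A =====
def createCharCountDict (cs : List Char) : PySem.Dict Char Int :=
  cs.foldl (fun d ch => d.insert (PySem.Chars.lowerChar ch) (d.getD (PySem.Chars.lowerChar ch) 0 + 1))
    PySem.Dict.empty

def reorderStr (inputStr : String) : String :=
  let cs := inputStr.toList
  let charCountDict := createCharCountDict cs
  -- min(...)/max(...) raise ValueError on an empty items list; Pre_ excludes "", so .getD 0 never fires
  let minCount : Int := ((PySem.List.min? charCountDict.items (fun x => x.2)).map (fun x => x.2)).getD 0
  let maxCount : Int := ((PySem.List.max? charCountDict.items (fun x => x.2)).map (fun x => x.2)).getD 0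
  let answer : List Char := (PySem.List.pyRange minCount (maxCount + 1) 1).foldl
    (fun acc charCount => cs.foldl
      (fun acc ch =>
        -- charCountDict[char.lower()]: the key is always present, getD is the total form
        if charCountDict.getD (PySem.Chars.lowerChar ch) 0 == charCount then acc ++ [ch] else acc)
      acc) []
  String.mk answer

-- ===== PORT B =====
def reorderStr_alt (inputStr : String) : String :=
  let cs := inputStr.toList
  let counts := cs.foldl
    (fun d ch => d.insert (PySem.Chars.lowerChar ch) (d.getD (PySem.Chars.lowerChar ch) 0 + 1))
    (PySem.Dict.empty : PySem.Dict Char Int)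
  -- buckets.setdefault(c, []).append(ch)  =  modify c, default [], append [ch]
  let buckets := cs.foldl
    (fun d ch => d.modify (counts.getD (PySem.Chars.lowerChar ch) 0) [] (fun l => l ++ [ch]))
    (PySem.Dict.empty : PySem.Dict Int (List Char))
  let ks := PySem.List.sorted buckets.keys (fun c => c) false
  -- buckets[c]: every key of ks is present, getD [] is the total form
  String.mk ((ks.map (fun c => buckets.getD c [])).flatten)

-- ===== PRECONDITION & SPEC =====
-- Pre_ excludes exactly the empty string, on which A's min() of an empty sequence raises ValueError.
def Pre_reorderStr (inputStr : String) : Prop := inputStr ≠ ""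
instance (inputStr : String) : Decidable (Pre_reorderStr inputStr) := by
  unfold Pre_reorderStr; infer_instance
def pvWitness_reorderStr : String := "abca"

def Spec_reorderStr (inputStr : String) (out : String) : Prop := out = reorderStr_alt inputStr
instance (inputStr : String) (out : String) : Decidable (Spec_reorderStr inputStr out) := by
  unfold Spec_reorderStr; infer_instance

-- ===== CLAIM (what is proved, stated in full; the proofs are below) =====
def Claim_equal_reorderStr : Prop := ∀ (inputStr : String), Dom_reorderStr inputStr →
  Pre_reorderStr inputStr → Spec_reorderStr inputStr (reorderStr inputStr)

-- ===== LEMMAS AND PROOFS =====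

-- a flatMap may skip the elements whose image is empty
theorem flatMap_filter_of_nil {α β : Type} (q : α → Bool) (F : α → List β) :
    ∀ (l : List α), (∀ c ∈ l, q c = false → F c = []) →
    l.flatMap F = (l.filter q).flatMap F := by
  intro l
  induction l with
  | nil => intro _; rfl
  | cons x t ih =>
    intro h
    by_cases hx : q x = true
    · simp [List.flatMap_cons, hx, ih (fun c hc => h c (List.mem_cons_of_mem _ hc))]
    · have hx' : q x = false := by simpa using hx
      simp [List.flatMap_cons, hx', h x (List.mem_cons_self) hx',
        ih (fun c hc => h c (List.mem_cons_of_mem _ hc))]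

theorem reorderStr_main (inputStr : String) (hne : inputStr ≠ "") :
    reorderStr inputStr = reorderStr_alt inputStr := by
  unfold reorderStr reorderStr_alt createCharCountDict
  set cs := inputStr.toList with hcs_def
  have hcs : cs ≠ [] := fun h => hne (String.toList_eq_nil_iff.mp h)
  set lc := PySem.Chars.lowerChar with hlc
  set L : List Char := cs.map lc with hL
  have hcount : cs.foldl (fun d ch => d.insert (lc ch) (d.getD (lc ch) 0 + 1))
      (PySem.Dict.empty : PySem.Dict Char Int) = PySem.Dict.counter L := by
    rw [hL, ← PySem.Dict.foldl_insert_getD_add_one_eq_counter]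
    simp [List.foldl_map]
  simp only [hcount, PySem.Dict.getD_counter]
  -- the count values list and the membership test
  set V : List Int := cs.map (fun ch => ((L.count (lc ch) : Int))) with hV
  set q : Int → Bool := fun c => decide (c ∈ V) with hq
  -- per-count filter
  set F : Int → List Char := fun c => cs.filter (fun ch => ((L.count (lc ch) : Int) == c)) with hF
  -- the bucket dictionary
  set B := cs.foldl (fun d ch => d.modify ((L.count (lc ch) : Int)) [] fun l => l ++ [ch])
      (PySem.Dict.empty : PySem.Dict Int (List Char)) with hB
  have hBpairs : B = (cs.map (fun ch => (((L.count (lc ch) : Int)), ch))).foldl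
      (fun d p => d.modify p.1 [] fun l => l ++ [p.2]) PySem.Dict.empty := by
    rw [hB]; simp [List.foldl_map]
  have hgetD : ∀ c : Int, B.getD c [] = F c := by
    intro c
    rw [hBpairs, PySem.Dict.getD_foldl_modify_append, hF]
    simp [List.filter_map, Function.comp_def]
  have hkeys : B.keys = PySem.Set.ofList V := by
    rw [hB]
    have := PySem.Dict.keys_foldl_modify_key (l := cs)
      (key := fun ch => ((L.count (lc ch) : Int))) (d0 := ([] : List Char))
      (f := fun _ ch l => l ++ [ch]) (d := PySem.Dict.empty)
    simpa [PySem.Set.update, PySem.Set.ofList_eq_foldl, PySem.Dict.empty, PySem.Dict.keys, hV]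
      using this
  -- min and max exist since the string is nonempty
  have hL_ne : L ≠ [] := by simpa [hL] using hcs
  have hitems : (PySem.Dict.counter L).items
      = (PySem.Set.ofList L).map (fun k => (k, (L.count k : Int))) :=
    PySem.Dict.items_counter L
  have hitems_ne : (PySem.Dict.counter L).items ≠ [] := by
    rw [hitems]
    simp only [ne_eq, List.map_eq_nil_iff]
    intro hnil
    rcases List.exists_mem_of_ne_nil L hL_ne with ⟨x, hx⟩
    have : x ∈ PySem.Set.ofList L := (PySem.Set.mem_ofList _ _).mpr hx
    simp [hnil] at this
  obtain ⟨pm, hpm⟩ : ∃ pm, PySem.List.min? (PySem.Dict.counter L).items (fun x => x.2) = some pm := by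
    cases hmin : PySem.List.min? (PySem.Dict.counter L).items (fun x => x.2) with
    | none => exact absurd ((PySem.List.min?_eq_none_iff _ _).mp hmin) hitems_ne
    | some pm => exact ⟨pm, rfl⟩
  obtain ⟨pM, hpM⟩ : ∃ pM, PySem.List.max? (PySem.Dict.counter L).items (fun x => x.2) = some pM := by
    cases hmax : PySem.List.max? (PySem.Dict.counter L).items (fun x => x.2) with
    | none => exact absurd ((PySem.List.max?_eq_none_iff _ _).mp hmax) hitems_ne
    | some pM => exact ⟨pM, rfl⟩
  rw [hpm, hpM]
  simp only [Option.map_some, Option.getD_some]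
  -- every count value lies between min and max
  have hball : ∀ c ∈ V, pm.2 ≤ c ∧ c ≤ pM.2 := by
    intro c hcV
    rcases List.mem_map.mp hcV with ⟨ch, hch, rfl⟩
    have hmemL : lc ch ∈ L := by rw [hL]; exact List.mem_map_of_mem hch
    have hmemI : (lc ch, (L.count (lc ch) : Int)) ∈ (PySem.Dict.counter L).items := by
      rw [hitems]
      exact List.mem_map.mpr ⟨lc ch, (PySem.Set.mem_ofList _ _).mpr hmemL, rfl⟩
    exact ⟨PySem.List.min?_isMin hpm _ hmemI, PySem.List.max?_isMax hpM _ hmemI⟩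
  -- the sorted distinct count values are exactly the inhabited part of range(min, max+1)
  set R := PySem.List.pyRange pm.2 (pM.2 + 1) 1 with hR
  have hRnodup : R.Nodup := by rw [hR]; exact PySem.List.nodup_pyRange_one _ _
  have hRpair : R.Pairwise (· < ·) := by rw [hR]; exact PySem.List.pairwise_lt_pyRange_one _ _
  have hks : PySem.List.sorted (PySem.Set.ofList V) (fun c => c) = R.filter q := by
    apply PySem.List.sorted_eq_of_perm_of_pairwise_lt
    · rw [List.perm_ext_iff_of_nodup (hRnodup.filter q) (PySem.Set.nodup_ofList V)]
      intro c
      rw [List.mem_filter, PySem.Set.mem_ofList _ _, hR, PySem.List.mem_pyRange_one, hq]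
      constructor
      · rintro ⟨_, hc⟩; simpa using hc
      · intro hc
        rcases hball c hc with ⟨h1, h2⟩
        exact ⟨⟨h1, by omega⟩, by simpa using hc⟩
    · exact hRpair.filter q
  rw [hkeys, hks]
  simp only [PySem.List.foldl_append_if_eq_filter, PySem.List.foldl_append_eq_flatMap,
    List.nil_append]
  congr 1
  rw [List.map_congr_left (fun c _ => hgetD c), ← List.flatMap_def]
  apply flatMap_filter_of_nil
  intro c hcR hqc
  rw [List.filter_eq_nil_iff]
  intro ch hch hp
  have hcV : c ∈ V := by
    have := beq_iff_eq.mp hp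
    rw [← this, hV]
    exact List.mem_map_of_mem hch
  simp [hq, hcV] at hqc

-- ===== VERDICT (by name: the statement is the Claim_ definition above) =====
theorem reorderStr_spec : Claim_equal_reorderStr := by
  intro s _ hpre
  exact reorderStr_main s hpre
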